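-- pv_equiv track=rewrite | github.com/nanof/VisoMaster-Fusion-Nanof | app/helpers/miscellaneous.py | count_issue_scan_frames
-- ===== SOURCE A (Python) =====
-- from bisect import bisect_left, bisect_right
-- from typing import Dict, Mapping, Tuple, Optional, Any, Collection, Sequence
--
-- def count_issue_scan_frames(
--     scan_ranges: Sequence[tuple[int, int]],
--     dropped_frames: Collection[int],
-- ) -> int:
--     """Count scan frames after excluding dropped render frames.
--
--     This keeps issue-scan progress and summary stats aligned with the frames that
--     render/output will actually keep.
--     """
--     normalized_ranges = normalize_issue_scan_ranges(scan_ranges)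
--     normalized_dropped = sorted({int(frame) for frame in dropped_frames})
--     total_frames = 0
--
--     for start_frame, end_frame in normalized_ranges:
--         normalized_start = int(start_frame)
--         normalized_end = int(end_frame)
--         if normalized_end < normalized_start:
--             continue
--
--         dropped_in_range = bisect_right(
--             normalized_dropped, normalized_end
--         ) - bisect_left(normalized_dropped, normalized_start)
--         total_frames += (normalized_end - normalized_start + 1) - dropped_in_range
--
--     return total_frames
--
-- def normalize_issue_scan_ranges(
--     scan_ranges: Sequence[tuple[int, int]],
-- ) -> list[tuple[int, int]]:
--     """Return chronologically sorted, overlap-merged scan ranges."""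
--     normalized: list[tuple[int, int]] = []
--
--     for start_frame, end_frame in scan_ranges:
--         normalized_start = int(start_frame)
--         normalized_end = int(end_frame)
--         if normalized_end < normalized_start:
--             continue
--         normalized.append((normalized_start, normalized_end))
--
--     if not normalized:
--         return []
--
--     normalized.sort()
--     merged_ranges: list[tuple[int, int]] = [normalized[0]]
--
--     for start_frame, end_frame in normalized[1:]:
--         previous_start, previous_end = merged_ranges[-1]
--         if start_frame <= previous_end:
--             merged_ranges[-1] = (previous_start, max(previous_end, end_frame))
--         else:
--             merged_ranges.append((start_frame, end_frame))
--
--     return merged_ranges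
-- ===== SOURCE B (Python) =====
-- def count_issue_scan_frames(scan_ranges, dropped_frames):
--     """Count scan frames after excluding dropped render frames.
--
--     Interval-subtraction approach: repeatedly take the first pending range,
--     count its frames minus the dropped frames it contains, and clip the
--     remaining ranges against it, so every frame is counted exactly once.
--     No sorting, no merging, no binary search.
--     """
--     pending = [(int(s), int(e)) for s, e in scan_ranges if int(s) <= int(e)]
--     dropped = {int(f) for f in dropped_frames}
--     total = 0
--     while pending:
--         (s, e), rest = pending[0], pending[1:]
--         clipped = []
--         for a, b in rest:
--             if a < s:
--                 clipped.append((a, min(b, s - 1)))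
--             if b > e:
--                 clipped.append((max(a, e + 1), b))
--         total += (e - s + 1) - sum(1 for f in dropped if s <= f <= e)
--         pending = clipped
--     return total
-- ===== Notes on version B (the rewrite author's own statement) =====
-- stated objective: alternative
-- what changed: Replaces the sort+merge+bisect pipeline with an unsorted interval-subtraction loop: take the first pending range, count its frames minus the dropped frames it contains, clip the remaining ranges against it, and repeat; no sorting, merging or binary search.
import Mathlib
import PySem

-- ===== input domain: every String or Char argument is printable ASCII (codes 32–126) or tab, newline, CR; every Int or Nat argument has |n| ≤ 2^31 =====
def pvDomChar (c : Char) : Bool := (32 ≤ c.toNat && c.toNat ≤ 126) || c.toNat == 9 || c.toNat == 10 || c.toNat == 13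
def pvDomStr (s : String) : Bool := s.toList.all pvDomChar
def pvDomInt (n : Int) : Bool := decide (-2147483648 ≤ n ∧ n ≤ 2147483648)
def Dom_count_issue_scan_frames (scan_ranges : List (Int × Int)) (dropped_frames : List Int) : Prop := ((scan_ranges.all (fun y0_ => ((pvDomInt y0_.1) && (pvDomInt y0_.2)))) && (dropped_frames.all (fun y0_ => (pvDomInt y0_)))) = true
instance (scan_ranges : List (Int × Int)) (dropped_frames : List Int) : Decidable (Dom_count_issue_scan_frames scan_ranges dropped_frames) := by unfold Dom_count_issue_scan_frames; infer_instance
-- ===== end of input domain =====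

-- B replaces A's sort+merge+bisect pipeline with an unsorted interval-subtraction loop
-- (clip the remaining ranges against the first one, repeat); a genuinely different
-- algorithm of similar size, not claimed faster.

-- ===== PORT A =====
def normalize_issue_scan_ranges (scan_ranges : List (Int × Int)) : List (Int × Int) :=
  let normalized := scan_ranges.foldl
    (fun acc p => if p.2 < p.1 then acc else acc ++ [(p.1, p.2)]) []
  if normalized = [] then []
  else
    match PySem.List.sorted2 normalized (fun p => p.1) (fun p => p.2) with
    | [] => []  -- unreachable: sorted2 of a nonempty list is nonempty
    | q :: rest =>
      -- 'merged' is held last-element-first (its head is Python's merged[-1]);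
      -- the final .reverse restores Python's order.
      (rest.foldl (fun merged p =>
          match merged with
          | [] => [p]  -- unreachable: the accumulator starts nonempty
          | (ps, pe) :: tl =>
            if p.1 ≤ pe then (ps, max pe p.2) :: tl else p :: (ps, pe) :: tl)
        [q]).reverse

def count_issue_scan_frames (scan_ranges : List (Int × Int)) (dropped_frames : List Int) : Int :=
  let normalized_ranges := normalize_issue_scan_ranges scan_ranges
  let normalized_dropped := PySem.List.sorted (PySem.Set.ofList dropped_frames) (fun x => x)
  normalized_ranges.foldl
    (fun total p =>
      if p.2 < p.1 then total
      else
        total + ((p.2 - p.1 + 1)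
          - ((PySem.List.bisectRight normalized_dropped p.2 : Int)
              - (PySem.List.bisectLeft normalized_dropped p.1 : Int)))) 0

-- ===== PORT B =====
-- the two 'if … clipped.append(…)' statements of Source B's inner loop
def pvClipPiece (s e : Int) (q : Int × Int) : List (Int × Int) :=
  (if q.1 < s then [(q.1, min q.2 (s - 1))] else []) ++
    (if e < q.2 then [(max q.1 (e + 1), q.2)] else [])

def pvClip (s e : Int) (rest : List (Int × Int)) : List (Int × Int) :=
  rest.foldl (fun acc q => acc ++ pvClipPiece s e q) []

def pvMeasure (l : List (Int × Int)) : Nat := (l.map (fun p => (p.2 + 1 - p.1).toNat)).sum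

theorem pvClip_eq (s e : Int) (rest : List (Int × Int)) :
    pvClip s e rest = rest.flatMap (pvClipPiece s e) := by
  have := PySem.List.foldl_append_eq_flatMap (pvClipPiece s e) rest []
  simpa [pvClip] using this

theorem pvMeasure_piece_le (s e : Int) (q : Int × Int) (h : s ≤ e) :
    pvMeasure (pvClipPiece s e q) ≤ (q.2 + 1 - q.1).toNat := by
  rcases q with ⟨a, b⟩
  by_cases h1 : a < s <;> by_cases h2 : e < b <;>
    simp [pvClipPiece, pvMeasure, h1, h2] <;> omega

-- termination helper for goB (cited in its decreasing_by)
theorem pvMeasure_clip_le (s e : Int) (rest : List (Int × Int)) (h : s ≤ e) :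
    pvMeasure (pvClip s e rest) ≤ pvMeasure rest := by
  rw [pvClip_eq]
  induction rest with
  | nil => simp [pvMeasure]
  | cons q t ih =>
    have hq := pvMeasure_piece_le s e q h
    simp only [List.flatMap_cons, pvMeasure, List.map_append, List.sum_append,
      List.map_cons, List.sum_cons] at *
    omega

-- Source B's while loop (tail of the list is processed by recursion; the 'else 0' branch is a
-- totality guard only: pending only ever holds ranges with s ≤ e)
def goB (dropped : List Int) (pending : List (Int × Int)) : Int :=
  match pending with
  | [] => 0
  | (s, e) :: rest =>
    if h : s ≤ e then
      ((e - s + 1) - (dropped.countP (fun f => s ≤ f && f ≤ e) : Int))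
        + goB dropped (pvClip s e rest)
    else 0
termination_by pvMeasure pending
decreasing_by
  have hle := pvMeasure_clip_le s e rest h
  simp only [pvMeasure, List.map_cons, List.sum_cons] at *
  omega

def count_issue_scan_frames_alt (scan_ranges : List (Int × Int)) (dropped_frames : List Int) : Int :=
  let pending := scan_ranges.foldl
    (fun acc p => if p.1 ≤ p.2 then acc ++ [(p.1, p.2)] else acc) []
  goB (PySem.Set.ofList dropped_frames) pending

-- ===== PRECONDITION & SPEC =====
def Spec_count_issue_scan_frames (scan_ranges : List (Int × Int)) (dropped_frames : List Int) (out : Int) : Prop := out = count_issue_scan_frames_alt scan_ranges dropped_frames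
instance (scan_ranges : List (Int × Int)) (dropped_frames : List Int) (out : Int) : Decidable (Spec_count_issue_scan_frames scan_ranges dropped_frames out) := by unfold Spec_count_issue_scan_frames; infer_instance

-- ===== CLAIM (what is proved, stated in full; the proofs are below) =====
def Claim_equal_count_issue_scan_frames : Prop := ∀ (scan_ranges : List (Int × Int)) (dropped_frames : List Int), Dom_count_issue_scan_frames scan_ranges dropped_frames → Spec_count_issue_scan_frames scan_ranges dropped_frames (count_issue_scan_frames scan_ranges dropped_frames)

-- ===== LEMMAS AND PROOFS =====

-- the set of frames covered by a list of (inclusive) ranges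
noncomputable def pvU (l : List (Int × Int)) : Finset Int :=
  l.foldr (fun p acc => Finset.Icc p.1 p.2 ∪ acc) ∅

theorem pvU_nil : pvU [] = ∅ := rfl

theorem pvU_cons (q : Int × Int) (t : List (Int × Int)) :
    pvU (q :: t) = Finset.Icc q.1 q.2 ∪ pvU t := rfl

theorem pvU_cons' (x y : Int) (t : List (Int × Int)) :
    pvU ((x, y) :: t) = Finset.Icc x y ∪ pvU t := rfl

theorem mem_pvU (a : Int) (l : List (Int × Int)) :
    a ∈ pvU l ↔ ∃ p ∈ l, p.1 ≤ a ∧ a ≤ p.2 := by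
  induction l with
  | nil => simp [pvU_nil]
  | cons q t ih => rw [pvU_cons]; simp [Finset.mem_union, Finset.mem_Icc, ih]

theorem pvU_perm {l l' : List (Int × Int)} (h : l.Perm l') : pvU l = pvU l' := by
  apply Finset.ext; intro a
  rw [mem_pvU, mem_pvU]
  constructor <;> rintro ⟨p, hp, h1, h2⟩ <;> exact ⟨p, by first | exact ⟨h.mem_iff.mp hp, h1, h2⟩ | exact ⟨h.symm.mem_iff.mp hp, h1, h2⟩⟩

theorem mem_clipPiece (s e : Int) (q p : Int × Int) :
    p ∈ pvClipPiece s e q ↔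
      ((q.1 < s ∧ p = (q.1, min q.2 (s - 1))) ∨ (e < q.2 ∧ p = (max q.1 (e + 1), q.2))) := by
  rcases q with ⟨a1, b1⟩
  by_cases c1 : a1 < s <;> by_cases c2 : e < b1 <;> simp [pvClipPiece, c1, c2]

theorem clip_cover (s e a : Int) (q : Int × Int) :
    (∃ p ∈ pvClipPiece s e q, p.1 ≤ a ∧ a ≤ p.2) ↔
      (q.1 ≤ a ∧ a ≤ q.2 ∧ ¬(s ≤ a ∧ a ≤ e)) := by
  rcases q with ⟨a1, b1⟩
  by_cases c1 : a1 < s <;> by_cases c2 : e < b1 <;> simp [pvClipPiece, c1, c2] <;> omega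

theorem pvClip_valid (s e : Int) (rest : List (Int × Int))
    (hv : ∀ q ∈ rest, q.1 ≤ q.2) : ∀ p ∈ pvClip s e rest, p.1 ≤ p.2 := by
  intro p hp
  rw [pvClip_eq, List.mem_flatMap] at hp
  obtain ⟨q, hq, hpq⟩ := hp
  have hqv := hv q hq
  rw [mem_clipPiece] at hpq
  rcases hpq with ⟨h1, rfl⟩ | ⟨h2, rfl⟩ <;> simp <;> omega

theorem pvU_clip (s e : Int) (rest : List (Int × Int)) :
    pvU (pvClip s e rest) = pvU rest \ Finset.Icc s e := by
  ext a
  rw [Finset.mem_sdiff, mem_pvU, mem_pvU, pvClip_eq]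
  constructor
  · rintro ⟨p, hp, h1, h2⟩
    rw [List.mem_flatMap] at hp
    obtain ⟨q, hq, hpq⟩ := hp
    have hc := (clip_cover s e a q).mp ⟨p, hpq, h1, h2⟩
    exact ⟨⟨q, hq, hc.1, hc.2.1⟩, by simpa [Finset.mem_Icc] using hc.2.2⟩
  · rintro ⟨⟨q, hq, h1, h2⟩, hni⟩
    obtain ⟨p, hp, hpa⟩ := (clip_cover s e a q).mpr ⟨h1, h2, by simpa [Finset.mem_Icc] using hni⟩
    exact ⟨p, List.mem_flatMap.mpr ⟨q, hq, hp⟩, hpa⟩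

theorem countP_nodup_card (l : List Int) (hnd : l.Nodup) (s e : Int) :
    l.countP (fun f => s ≤ f && f ≤ e) = (l.toFinset ∩ Finset.Icc s e).card := by
  have h1 : l.toFinset ∩ Finset.Icc s e = (l.filter (fun f => s ≤ f && f ≤ e)).toFinset := by
    ext a
    simp [Finset.mem_Icc, Finset.mem_inter]
  rw [h1, List.toFinset_card_of_nodup (hnd.filter _), List.countP_eq_length_filter]

theorem card_split (I V D : Finset Int) :
    ((I ∪ V) \ D).card = (I \ D).card + ((V \ I) \ D).card := by
  have hdisj : Disjoint (I \ D) ((V \ I) \ D) := by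
    rw [Finset.disjoint_left]
    intro a ha hb
    simp only [Finset.mem_sdiff] at ha hb
    tauto
  rw [← Finset.card_union_of_disjoint hdisj]
  congr 1
  ext a
  simp only [Finset.mem_sdiff, Finset.mem_union]
  tauto

theorem goB_eq_aux (dropped : List Int) (hnd : dropped.Nodup) (n : Nat) :
    ∀ pending, pvMeasure pending ≤ n → (∀ p ∈ pending, p.1 ≤ p.2) →
      goB dropped pending = ((pvU pending \ dropped.toFinset).card : Int) := by
  induction n with
  | zero =>
    rintro (_ | ⟨⟨s, e⟩, rest⟩) hm hv
    · simp [goB, pvU_nil]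
    · exfalso
      have := hv (s, e) (by simp)
      simp only [pvMeasure, List.map_cons, List.sum_cons] at hm
      omega
  | succ n ih =>
    rintro (_ | ⟨⟨s, e⟩, rest⟩) hm hv
    · simp [goB, pvU_nil]
    · have hs : s ≤ e := hv (s, e) (by simp)
      rw [goB]
      rw [dif_pos hs]
      have hmc : pvMeasure (pvClip s e rest) ≤ n := by
        have h1 := pvMeasure_clip_le s e rest hs
        simp only [pvMeasure, List.map_cons, List.sum_cons] at hm
        simp only [pvMeasure] at h1 ⊢
        omega
      rw [ih (pvClip s e rest) hmc (pvClip_valid s e rest (fun q hq => hv q (by simp [hq])))]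
      rw [pvU_cons, card_split, pvU_clip s e rest,
        countP_nodup_card dropped hnd s e]
      have h1 := Finset.card_sdiff_add_card_inter (Finset.Icc s e) dropped.toFinset
      have h2 : (Finset.Icc s e).card = (e + 1 - s).toNat := Int.card_Icc s e
      have h3 : dropped.toFinset ∩ Finset.Icc s e = Finset.Icc s e ∩ dropped.toFinset :=
        Finset.inter_comm _ _
      rw [h3]
      push_cast
      omega

theorem pending_eq_filter (scan_ranges : List (Int × Int)) :
    scan_ranges.foldl (fun acc p => if p.1 ≤ p.2 then acc ++ [(p.1, p.2)] else acc) []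
      = scan_ranges.filter (fun p => p.1 ≤ p.2) := by
  rw [PySem.List.foldl_append_ite (fun (p : Int × Int) => p.1 ≤ p.2) (fun p => (p.1, p.2))]
  simp

theorem ofList_toFinset (l : List Int) :
    (PySem.Set.ofList l : List Int).toFinset = l.toFinset := by
  ext a
  simp [List.mem_toFinset, PySem.Set.mem_ofList]

-- ----- A-side: sortedness of sorted2 in the first component -----
theorem insertBy_pairwise_of {α : Type} (R : α → α → Prop) (before : α → α → Bool)
    (h1 : ∀ a b, before a b = true → R a b) (h2 : ∀ a b, before a b = false → R b a)
    (htr : ∀ a b c, R a b → R b c → R a c) :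
    ∀ (ys : List α), ys.Pairwise R → ∀ (x : α), (PySem.List.insertBy before x ys).Pairwise R := by
  intro ys
  induction ys with
  | nil => intro _ x; simp [PySem.List.insertBy]
  | cons y t ih =>
    intro hp x
    rw [PySem.List.insertBy]
    rcases List.pairwise_cons.mp hp with ⟨hyt, hpt⟩
    by_cases hb : before x y = true
    · rw [if_pos hb]
      refine List.pairwise_cons.mpr ⟨?_, hp⟩
      intro z hz
      rcases List.mem_cons.mp hz with rfl | hz
      · exact h1 _ _ hb
      · exact htr _ _ _ (h1 _ _ hb) (hyt z hz)
    · rw [if_neg hb]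
      refine List.pairwise_cons.mpr ⟨?_, ih hpt x⟩
      intro z hz
      rcases (PySem.List.insertBy_mem_iff before x z t).mp hz with rfl | hz
      · exact h2 _ _ (by simpa using hb)
      · exact hyt z hz

theorem foldl_insertBy_pairwise {α : Type} (R : α → α → Prop) (before : α → α → Bool)
    (h1 : ∀ a b, before a b = true → R a b) (h2 : ∀ a b, before a b = false → R b a)
    (htr : ∀ a b c, R a b → R b c → R a c) :
    ∀ (xs : List α) (acc : List α), acc.Pairwise R →
      (xs.foldl (fun acc x => PySem.List.insertBy before x acc) acc).Pairwise R := by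
  intro xs
  induction xs with
  | nil => intro acc h; simpa
  | cons x t ih =>
    intro acc h
    simpa using ih _ (insertBy_pairwise_of R before h1 h2 htr acc h x)

theorem sorted2_pairwise_fst (xs : List (Int × Int)) :
    (PySem.List.sorted2 xs (fun p => p.1) (fun p => p.2)).Pairwise (fun a b => a.1 ≤ b.1) := by
  have h := foldl_insertBy_pairwise (fun (a b : Int × Int) => a.1 ≤ b.1)
    (fun a b => decide (a.1 < b.1) || (!decide (b.1 < a.1) && decide (a.2 < b.2)))
    (by
      intro a b hb
      simp only [Bool.or_eq_true, Bool.and_eq_true, Bool.not_eq_true', decide_eq_true_eq,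
        decide_eq_false_iff_not] at hb
      omega)
    (by
      intro a b hb
      simp only [Bool.or_eq_false_iff] at hb
      have h := of_decide_eq_false hb.1
      omega)
    (fun a b c hab hbc => le_trans hab hbc) xs [] (by simp)
  simpa [PySem.List.sorted2] using h

-- ----- A-side: the merge loop -----
def pvMergeStep (merged : List (Int × Int)) (p : Int × Int) : List (Int × Int) :=
  match merged with
  | [] => [p]
  | (ps, pe) :: tl =>
    if p.1 ≤ pe then (ps, max pe p.2) :: tl else p :: (ps, pe) :: tl

theorem merge_fold (rest : List (Int × Int)) :
    ∀ (ps pe : Int) (tl : List (Int × Int)),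
      ps ≤ pe →
      (((ps, pe) :: tl).Pairwise (fun a b => b.2 < a.1)) →
      (∀ q ∈ tl, q.1 ≤ q.2) →
      (∀ x ∈ rest, ps ≤ x.1) →
      rest.Pairwise (fun a b => a.1 ≤ b.1) →
      (∀ x ∈ rest, x.1 ≤ x.2) →
      (∀ p ∈ rest.foldl pvMergeStep ((ps, pe) :: tl), p.1 ≤ p.2) ∧
        (rest.foldl pvMergeStep ((ps, pe) :: tl)).Pairwise (fun a b => b.2 < a.1) ∧
        pvU (rest.foldl pvMergeStep ((ps, pe) :: tl)) = pvU ((ps, pe) :: tl) ∪ pvU rest := by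
  induction rest with
  | nil =>
    intro ps pe tl hval hpw htlv _ _ _
    refine ⟨?_, hpw, by simp [pvU_nil]⟩
    intro p hp
    rcases List.mem_cons.mp hp with rfl | hp
    · exact hval
    · exact htlv p hp
  | cons x t ih =>
    intro ps pe tl hval hpw htlv hrest hsorted hrestv
    obtain ⟨s, e⟩ := x
    have hpsS : ps ≤ s := hrest (s, e) (by simp)
    have hse : s ≤ e := hrestv (s, e) (by simp)
    rcases List.pairwise_cons.mp hpw with ⟨hhead, htlpw⟩
    rcases List.pairwise_cons.mp hsorted with ⟨hsfst, htspw⟩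
    simp only [List.foldl_cons]
    by_cases hb : s ≤ pe
    · rw [show pvMergeStep ((ps, pe) :: tl) (s, e) = (ps, max pe e) :: tl by
        simp [pvMergeStep, hb]]
      obtain ⟨hv', hpw', hU'⟩ := ih ps (max pe e) tl (le_trans hval (le_max_left _ _))
        (List.pairwise_cons.mpr ⟨hhead, htlpw⟩) htlv
        (fun y hy => hrest y (by simp [hy]))
        htspw (fun y hy => hrestv y (by simp [hy]))
      refine ⟨hv', hpw', ?_⟩
      rw [hU']
      have hIcc : Finset.Icc ps (max pe e) = Finset.Icc ps pe ∪ Finset.Icc s e := by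
        ext a
        simp only [Finset.mem_Icc, Finset.mem_union]
        omega
      simp only [pvU_cons']
      rw [hIcc]
      ext a
      simp only [Finset.mem_union]
      tauto
    · rw [show pvMergeStep ((ps, pe) :: tl) (s, e) = (s, e) :: (ps, pe) :: tl by
        simp [pvMergeStep, hb]]
      have hpes : pe < s := by omega
      obtain ⟨hv', hpw', hU'⟩ := ih s e ((ps, pe) :: tl) hse
        (List.pairwise_cons.mpr ⟨by
          intro b hbmem
          rcases List.mem_cons.mp hbmem with rfl | hbmem
          · exact hpes
          · have := hhead b hbmem
            omega, hpw⟩)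
        (fun q hq => by
          rcases List.mem_cons.mp hq with rfl | hq
          · exact hval
          · exact htlv q hq)
        (fun y hy => hsfst y hy)
        htspw (fun y hy => hrestv y (by simp [hy]))
      refine ⟨hv', hpw', ?_⟩
      rw [hU']
      simp only [pvU_cons']
      ext a
      simp only [Finset.mem_union]
      tauto

theorem normalize_char (scan_ranges : List (Int × Int)) :
    (∀ p ∈ normalize_issue_scan_ranges scan_ranges, p.1 ≤ p.2) ∧
      (normalize_issue_scan_ranges scan_ranges).Pairwise (fun a b => a.2 < b.1) ∧
      pvU (normalize_issue_scan_ranges scan_ranges)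
        = pvU (scan_ranges.filter (fun p => p.1 ≤ p.2)) := by
  unfold normalize_issue_scan_ranges
  have hnorm : scan_ranges.foldl (fun acc p => if p.2 < p.1 then acc else acc ++ [(p.1, p.2)]) []
      = scan_ranges.filter (fun p => p.1 ≤ p.2) := by
    rw [PySem.List.foldl_congr_mem _ _
      (fun acc (p : Int × Int) => if p.1 ≤ p.2 then acc ++ [(p.1, p.2)] else acc) []
      (fun acc x _ => by
        by_cases h : x.2 < x.1
        · simp [h, show ¬(x.1 ≤ x.2) by omega]
        · simp [h, show x.1 ≤ x.2 by omega])]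
    exact pending_eq_filter scan_ranges
  simp only [hnorm]
  by_cases hempty : scan_ranges.filter (fun p => p.1 ≤ p.2) = []
  · simp [hempty, pvU_nil]
  · rw [if_neg hempty]
    cases hsort : PySem.List.sorted2 (scan_ranges.filter (fun p => p.1 ≤ p.2))
        (fun p => p.1) (fun p => p.2) with
    | nil =>
      exfalso
      have hperm := PySem.List.sorted2_perm (scan_ranges.filter (fun p => p.1 ≤ p.2))
        (fun p => p.1) (fun p => p.2) false
      rw [hsort] at hperm
      exact hempty hperm.symm.eq_nil
    | cons q rest =>
      obtain ⟨q1, q2⟩ := q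
      dsimp only
      have hstep : (fun (merged : List (Int × Int)) (p : Int × Int) =>
          match merged with
          | [] => [p]
          | (ps, pe) :: tl =>
            if p.1 ≤ pe then (ps, max pe p.2) :: tl else p :: (ps, pe) :: tl) = pvMergeStep := rfl
      rw [hstep]
      have hperm : ((q1, q2) :: rest).Perm (scan_ranges.filter (fun p => p.1 ≤ p.2)) := by
        have := PySem.List.sorted2_perm (scan_ranges.filter (fun p => p.1 ≤ p.2))
          (fun p => p.1) (fun p => p.2) false
        rwa [hsort] at this
      have hsfst : ((q1, q2) :: rest).Pairwise (fun a b => a.1 ≤ b.1) := by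
        have := sorted2_pairwise_fst (scan_ranges.filter (fun p => p.1 ≤ p.2))
        rwa [hsort] at this
      have hvalid_all : ∀ x ∈ (q1, q2) :: rest, x.1 ≤ x.2 := by
        intro x hx
        have hmem : x ∈ scan_ranges.filter (fun p => p.1 ≤ p.2) := hperm.mem_iff.mp hx
        simpa using (List.mem_filter.mp hmem).2
      obtain ⟨hv, hpw, hU⟩ := merge_fold rest q1 q2 [] (hvalid_all (q1, q2) (by simp))
        (by simp) (by simp)
        (fun x hx => (List.pairwise_cons.mp hsfst).1 x hx)
        (List.pairwise_cons.mp hsfst).2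
        (fun x hx => hvalid_all x (by simp [hx]))
      refine ⟨?_, ?_, ?_⟩
      · intro p hp
        exact hv p (List.mem_reverse.mp hp)
      · exact List.pairwise_reverse.mpr hpw
      · have hrev : pvU ((rest.foldl pvMergeStep [(q1, q2)]).reverse)
            = pvU (rest.foldl pvMergeStep [(q1, q2)]) :=
          pvU_perm (List.reverse_perm _)
        rw [hrev, hU, ← pvU_perm hperm, pvU_cons, pvU_cons, pvU_nil]
        ext a
        simp only [Finset.mem_union, Finset.notMem_empty]
        tauto

-- ----- A-side: bisect counts -----
theorem countP_boundary (l : List Int) (p : Int → Bool) :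
    ∀ k, k ≤ l.length → (∀ j (hj : j < l.length), j < k → p l[j]) →
      (∀ j (hj : j < l.length), k ≤ j → ¬ p l[j]) → l.countP p = k := by
  induction l with
  | nil =>
    intro k hk _ _
    simp only [List.length_nil, Nat.le_zero] at hk
    simp [hk]
  | cons x t ih =>
    intro k hk h1 h2
    cases k with
    | zero =>
      have hall : ∀ y ∈ x :: t, ¬ p y := by
        intro y hy
        obtain ⟨j, hj, rfl⟩ := List.mem_iff_getElem.mp hy
        exact h2 j hj (Nat.zero_le j)
      simp [List.countP_eq_zero.mpr hall]
    | succ k =>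
      have hpx : p x := by simpa using h1 0 (by simp) (Nat.succ_pos k)
      rw [List.countP_cons_of_pos hpx]
      rw [ih k (by simpa using hk)
        (fun j hj hjk => by simpa using h1 (j + 1) (by simpa) (by omega))
        (fun j hj hjk => by simpa using h2 (j + 1) (by simpa) (by omega))]

theorem countP_le_split (l : List Int) (s e : Int) (hse : s ≤ e) :
    l.countP (fun x => x ≤ e) = l.countP (fun x => x < s) + l.countP (fun x => s ≤ x && x ≤ e) := by
  induction l with
  | nil => simp
  | cons x t ih =>
    simp only [List.countP_cons]
    rcases lt_or_ge x s with h | h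
    · have hxe : x ≤ e := by omega
      simp [h, hxe, not_le.mpr h, ih]
      omega
    · by_cases hxe : x ≤ e <;> simp [not_lt.mpr h, h, hxe, ih]
      omega

theorem bisect_count (nd : List Int) (hlt : nd.Pairwise (· < ·)) (s e : Int) (hse : s ≤ e) :
    (PySem.List.bisectRight nd e : Int) - (PySem.List.bisectLeft nd s : Int)
      = ((nd.toFinset ∩ Finset.Icc s e).card : Int) := by
  have hle : nd.Pairwise (· ≤ ·) := hlt.imp (fun h => le_of_lt h)
  obtain ⟨hbl_le, hbl1, hbl2⟩ := PySem.List.bisectLeft_spec nd s hle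
  obtain ⟨hbr_le, hbr1, hbr2⟩ := PySem.List.bisectRight_spec nd e hle
  have hcl : nd.countP (fun x => x < s) = PySem.List.bisectLeft nd s :=
    countP_boundary nd _ _ hbl_le (fun j hj hlt' => by simpa using hbl1 j hj hlt')
      (fun j hj hge => by simpa using not_lt.mpr (hbl2 j hj hge))
  have hcr : nd.countP (fun x => x ≤ e) = PySem.List.bisectRight nd e :=
    countP_boundary nd _ _ hbr_le (fun j hj h => by simpa using hbr1 j hj h)
      (fun j hj h => by simpa using not_le.mpr (hbr2 j hj h))
  have hsplit := countP_le_split nd s e hse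
  have hnodup : nd.Nodup := hlt.imp (fun h => ne_of_lt h)
  have hcard := countP_nodup_card nd hnodup s e
  omega

-- ----- A-side: summing over the merged (disjoint, sorted) ranges -----
theorem sum_merged (nd : List Int) (hlt : nd.Pairwise (· < ·)) :
    ∀ M : List (Int × Int), (∀ p ∈ M, p.1 ≤ p.2) → M.Pairwise (fun a b => a.2 < b.1) →
      (M.map (fun p => (p.2 - p.1 + 1)
          - ((PySem.List.bisectRight nd p.2 : Int) - (PySem.List.bisectLeft nd p.1 : Int)))).sum
        = ((pvU M \ nd.toFinset).card : Int) := by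
  intro M
  induction M with
  | nil => simp [pvU_nil]
  | cons p t ih =>
    intro hv hpw
    simp only [List.map_cons, List.sum_cons]
    rw [ih (fun q hq => hv q (by simp [hq])) (List.pairwise_cons.mp hpw).2]
    rw [bisect_count nd hlt p.1 p.2 (hv p (by simp))]
    rw [pvU_cons]
    have hdisj : Disjoint (Finset.Icc p.1 p.2 \ nd.toFinset) (pvU t \ nd.toFinset) := by
      rw [Finset.disjoint_left]
      intro a ha hb
      rw [Finset.mem_sdiff, Finset.mem_Icc] at ha
      rw [Finset.mem_sdiff, mem_pvU] at hb
      obtain ⟨⟨q, hq, h1, h2⟩, _⟩ := hb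
      have := (List.pairwise_cons.mp hpw).1 q hq
      omega
    have hsplit : ((Finset.Icc p.1 p.2 ∪ pvU t) \ nd.toFinset).card
        = ((Finset.Icc p.1 p.2) \ nd.toFinset).card + ((pvU t) \ nd.toFinset).card := by
      rw [← Finset.card_union_of_disjoint hdisj]
      congr 1
      ext a
      simp only [Finset.mem_sdiff, Finset.mem_union]
      tauto
    rw [hsplit]
    have h1 := Finset.card_sdiff_add_card_inter (Finset.Icc p.1 p.2) nd.toFinset
    have h2 := Int.card_Icc p.1 p.2
    have h3 : nd.toFinset ∩ Finset.Icc p.1 p.2 = Finset.Icc p.1 p.2 ∩ nd.toFinset :=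
      Finset.inter_comm _ _
    rw [h3]
    have hv0 := hv p (by simp)
    push_cast
    omega

-- A and B agree because both compute |(union of valid ranges) \ dropped|
theorem countA_eq (scan_ranges : List (Int × Int)) (dropped_frames : List Int) :
    count_issue_scan_frames scan_ranges dropped_frames
      = (((pvU (scan_ranges.filter (fun p => p.1 ≤ p.2)))
          \ dropped_frames.toFinset).card : Int) := by
  obtain ⟨hv, hpw, hU⟩ := normalize_char scan_ranges
  unfold count_issue_scan_frames
  have hlt : (PySem.List.sorted (PySem.Set.ofList dropped_frames) (fun x => x)).Pairwise (· < ·) :=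
    PySem.List.sorted_ofList_pairwise_lt dropped_frames
  have hndF : (PySem.List.sorted (PySem.Set.ofList dropped_frames) (fun x => x)).toFinset
      = dropped_frames.toFinset := by
    ext a
    simp [List.mem_toFinset, PySem.List.mem_sorted, PySem.Set.mem_ofList]
  rw [PySem.List.foldl_congr_mem _ _
    (fun total (p : Int × Int) => total + ((p.2 - p.1 + 1)
      - ((PySem.List.bisectRight (PySem.List.sorted (PySem.Set.ofList dropped_frames) (fun x => x)) p.2 : Int)
          - (PySem.List.bisectLeft (PySem.List.sorted (PySem.Set.ofList dropped_frames) (fun x => x)) p.1 : Int)))) 0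
    (fun acc x hx => by rw [if_neg (not_lt.mpr (hv x hx))])]
  rw [PySem.List.foldl_add]
  rw [sum_merged _ hlt _ hv hpw, hU, hndF]
  simp

theorem countB_eq (scan_ranges : List (Int × Int)) (dropped_frames : List Int) :
    count_issue_scan_frames_alt scan_ranges dropped_frames
      = (((pvU (scan_ranges.filter (fun p => p.1 ≤ p.2)))
          \ dropped_frames.toFinset).card : Int) := by
  unfold count_issue_scan_frames_alt
  rw [pending_eq_filter]
  rw [goB_eq_aux (PySem.Set.ofList dropped_frames) (PySem.Set.nodup_ofList _)
    (pvMeasure (scan_ranges.filter (fun p => p.1 ≤ p.2))) _ le_rfl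
    (fun p hp => by simpa using (List.mem_filter.mp hp).2)]
  rw [ofList_toFinset]

-- ===== VERDICT (by name: the statement is the Claim_ definition above) =====
theorem count_issue_scan_frames_spec : Claim_equal_count_issue_scan_frames := by
  intro sr df _
  show _ = _
  rw [countA_eq, countB_eq]
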